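-- pv_equiv track=rewrite | github.com/sjl421/algo-1 | algo-python/algo/hash/base62.py | base62_to_decimal
-- ===== SOURCE A (Python) =====
-- def base62_to_decimal(base62str):
--     def ord_base62(c):
--         if '0' <= c <= '9':
--             return int(c)
--         elif 'a' <= c <= 'z':
--             return ord(c) - ord('a') + 10
--         elif 'A' <= c <= 'Z':
--             return ord(c) - ord('A') + 36
--         else:
--             return -1
--     base10 = 0
--     for symbol in base62str:
--         base10 = base10 * 62 + ord_base62(symbol)
--     return base10
-- ===== SOURCE B (Python) =====
-- _ALPHABET = "0123456789abcdefghijklmnopqrstuvwxyzABCDEFGHIJKLMNOPQRSTUVWXYZ"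
--
-- def base62_to_decimal(base62str):
--     # digit value = position of the char in the base62 alphabet (str.find gives -1
--     # for a char outside it, exactly A's invalid-char value); walk the string
--     # right-to-left, summing digit * positional weight with a running weight of 62^i.
--     total = 0
--     weight = 1
--     for c in reversed(base62str):
--         total += _ALPHABET.find(c) * weight
--         weight *= 62
--     return total
-- ===== Notes on version B (the rewrite author's own statement) =====
-- stated objective: alternative
-- what changed: Replaces the Horner accumulator with an if-chain digit helper by a table lookup (str.find in the base62 alphabet string, whose -1-on-miss matches A's invalid-char value) and a right-to-left pass summing digit times an explicit running positional weight of 62.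
import Mathlib
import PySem

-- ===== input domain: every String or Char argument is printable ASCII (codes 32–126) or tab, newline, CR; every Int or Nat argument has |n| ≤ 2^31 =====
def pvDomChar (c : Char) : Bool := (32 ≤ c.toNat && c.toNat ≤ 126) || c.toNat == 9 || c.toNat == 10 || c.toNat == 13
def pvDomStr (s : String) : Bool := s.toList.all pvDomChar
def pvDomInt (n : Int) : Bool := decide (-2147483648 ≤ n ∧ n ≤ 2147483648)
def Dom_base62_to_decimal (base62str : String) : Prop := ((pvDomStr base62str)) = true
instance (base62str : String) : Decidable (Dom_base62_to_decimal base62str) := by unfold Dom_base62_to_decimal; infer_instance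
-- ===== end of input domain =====

-- B replaces A's Horner loop with an if-chain digit helper by a table lookup
-- (str.find in the base62 alphabet, -1 on miss like A) in a right-to-left pass
-- with an explicit running positional weight of 62 (alternative decomposition).

-- ===== PORT A =====
-- A's inner ord_base62; int(c) on one decimal digit is code(c) - code('0').
def ordBase62 (c : Char) : Int :=
  if '0' ≤ c ∧ c ≤ '9' then (c.toNat : Int) - ('0'.toNat : Int)
  else if 'a' ≤ c ∧ c ≤ 'z' then (c.toNat : Int) - ('a'.toNat : Int) + 10
  else if 'A' ≤ c ∧ c ≤ 'Z' then (c.toNat : Int) - ('A'.toNat : Int) + 36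
  else -1

def base62_to_decimal (base62str : String) : Int :=
  base62str.toList.foldl (fun base10 symbol => base10 * 62 + ordBase62 symbol) 0

-- ===== PORT B =====
def pvBase62Alphabet : String := "0123456789abcdefghijklmnopqrstuvwxyzABCDEFGHIJKLMNOPQRSTUVWXYZ"

def base62_to_decimal_alt (base62str : String) : Int :=
  (base62str.toList.reverse.foldl
    (fun (st : Int × Int) c =>
      (st.1 + PySem.Str.find pvBase62Alphabet (String.ofList [c]) * st.2, st.2 * 62)) (0, 1)).1

-- ===== PRECONDITION & SPEC =====
def Spec_base62_to_decimal (base62str : String) (out : Int) : Prop := out = base62_to_decimal_alt base62str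
instance (base62str : String) (out : Int) : Decidable (Spec_base62_to_decimal base62str out) := by unfold Spec_base62_to_decimal; infer_instance

-- ===== CLAIM (what is proved, stated in full; the proofs are below) =====
def Claim_equal_base62_to_decimal : Prop := ∀ (base62str : String), Dom_base62_to_decimal base62str → Spec_base62_to_decimal base62str (base62_to_decimal base62str)

-- ===== LEMMAS AND PROOFS =====

-- For every char code below 127, looking the char up in the alphabet string
-- (Python str.find) gives exactly A's ord_base62 value (checked by computation).
set_option maxRecDepth 100000 in
theorem findAux : ∀ n : Nat, n < 127 →
    PySem.Str.find pvBase62Alphabet (String.ofList [Char.ofNat n]) = ordBase62 (Char.ofNat n) := by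
  decide

theorem find_eq_ord (c : Char) (h : pvDomChar c = true) :
    PySem.Str.find pvBase62Alphabet (String.ofList [c]) = ordBase62 c := by
  have hn : c.toNat < 127 := by
    simp only [pvDomChar, Bool.or_eq_true, Bool.and_eq_true, decide_eq_true_eq,
      beq_iff_eq] at h
    omega
  have := findAux c.toNat hn
  rwa [Char.ofNat_toNat] at this

-- B's reversed fold from (r, p) yields r plus p times the Horner value of the
-- list read back in original order.
theorem alt_fold_eq (m : List Char) : ∀ r p : Int,
    (m.foldl (fun (st : Int × Int) c =>
        (st.1 + PySem.Str.find pvBase62Alphabet (String.ofList [c]) * st.2, st.2 * 62)) (r, p)).1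
      = r + p * (m.reverse.foldl
          (fun b c => b * 62 + PySem.Str.find pvBase62Alphabet (String.ofList [c])) 0) := by
  induction m with
  | nil => intro r p; simp
  | cons c tl ih =>
    intro r p
    simp only [List.foldl_cons, List.reverse_cons, List.foldl_append, List.foldl_cons,
      List.foldl_nil, ih]
    ring

-- On in-domain chars the two Horner folds (lookup digit vs if-chain digit) agree.
theorem horner_find_eq_ord (m : List Char) (hm : ∀ c ∈ m, pvDomChar c = true) : ∀ a : Int,
    m.foldl (fun b c => b * 62 + PySem.Str.find pvBase62Alphabet (String.ofList [c])) a
      = m.foldl (fun b c => b * 62 + ordBase62 c) a := by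
  induction m with
  | nil => intro a; rfl
  | cons c tl ih =>
    intro a
    simp only [List.foldl_cons, find_eq_ord c (hm c List.mem_cons_self)]
    exact ih (fun d hd => hm d (List.mem_cons_of_mem _ hd)) _

-- ===== VERDICT (by name: the statement is the Claim_ definition above) =====
theorem base62_to_decimal_spec : Claim_equal_base62_to_decimal := by
  intro s hdom
  unfold Spec_base62_to_decimal base62_to_decimal base62_to_decimal_alt
  rw [alt_fold_eq, List.reverse_reverse, horner_find_eq_ord]
  · simp
  · intro c hc
    unfold Dom_base62_to_decimal pvDomStr at hdom
    exact List.all_eq_true.1 hdom _ hc
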